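-- pv_equiv track=rewrite | github.com/diocloid/adventOfCode | 2021/day4/day4part1.py | buildboards
-- ===== SOURCE A (Python) =====
-- def buildboards(boardsinput):
--     boards = []
--     board = []
--     for i in boardsinput:
--         if(i == ''):
--             boards.append(board)
--             board = []
--         else:
--             i = i.replace('  ', ' ').strip()
--             board.append(i.split(' '))
--     boards.append(board)
--     boards.pop(0)
--     return boards
-- ===== SOURCE B (Python) =====
-- def buildboards(boardsinput):
--     def segments(lines):
--         if '' not in lines:
--             return [lines]
--         p = lines.index('')
--         return [lines[:p]] + segments(lines[p + 1:])
--     return [[line.replace('  ', ' ').strip().split(' ') for line in seg]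
--             for seg in segments(boardsinput)[1:]]
-- ===== Notes on version B (the rewrite author's own statement) =====
-- stated objective: faster
-- what changed: Replaces A's single-pass accumulator state machine (running board/boards lists mutated per line) with a recursive split: find the first blank line with list.index, slice the segment off, recurse on the remainder, then map the per-line processing over each segment and drop the first; C-level index/slice and list comprehensions replace per-line interpreted append/compare work.
import Mathlib
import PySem

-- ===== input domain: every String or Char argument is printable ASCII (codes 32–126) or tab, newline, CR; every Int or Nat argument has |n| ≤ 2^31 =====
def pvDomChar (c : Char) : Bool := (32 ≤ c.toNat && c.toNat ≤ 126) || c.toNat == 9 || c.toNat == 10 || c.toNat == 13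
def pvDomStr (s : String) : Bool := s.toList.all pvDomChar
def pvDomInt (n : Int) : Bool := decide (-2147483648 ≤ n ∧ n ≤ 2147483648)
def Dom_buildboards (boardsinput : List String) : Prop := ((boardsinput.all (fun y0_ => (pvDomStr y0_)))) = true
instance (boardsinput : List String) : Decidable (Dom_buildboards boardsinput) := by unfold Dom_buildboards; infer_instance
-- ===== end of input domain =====

-- B replaces A's per-line accumulator state machine by a recursive find-blank/slice split
-- followed by a map over the segments (alternative decomposition, same cost).

-- per-line processing, identical in both Pythons: i.replace('  ', ' ').strip().split(' ')
def pvProcLine (s : String) : List String :=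
  (PySem.Str.split? (PySem.Str.strip (PySem.Str.replace s "  " " ")) " ").getD []
  -- split? returns some for the nonempty literal separator " ", so .getD [] is exact

-- ===== PORT A =====
-- the for-loop over boardsinput with state (boards, board); boards.pop(0) is .tail
-- (boards is nonempty here: the final append precedes the pop)
def buildboards (boardsinput : List String) : List (List (List String)) :=
  let st := boardsinput.foldl
    (fun (acc : List (List (List String)) × List (List String)) i =>
      if i = "" then (acc.1 ++ [acc.2], [])
      else (acc.1, acc.2 ++ [pvProcLine i]))
    ([], [])
  (st.1 ++ [st.2]).tail

-- ===== PORT B =====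
-- Source B's recursive 'segments': Python's `'' not in lines` test plus `lines.index('')`
-- are the two outcomes of one PySem.List.index? lookup (exact: index? = none ↔ '' ∉ lines)
def pvSegments (lines : List String) : List (List String) :=
  match h : PySem.List.index? lines "" with
  | none => [lines]
  | some p =>
      PySem.List.slice lines none (some (p : Int)) ::
        pvSegments (PySem.List.slice lines (some ((p : Int) + 1)) none)
termination_by lines.length
decreasing_by
  obtain ⟨hk, -, -⟩ := PySem.List.getElem_of_index?_eq_some h
  rw [PySem.List.slice_from lines (a := (p : Int) + 1) (by positivity)]
  simp only [List.length_drop]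
  omega

-- segments(boardsinput)[1:], each line mapped through the identical per-line processing
def buildboards_alt (boardsinput : List String) : List (List (List String)) :=
  (PySem.List.slice (pvSegments boardsinput) (some 1) none).map
    (fun seg => seg.map pvProcLine)

-- ===== PRECONDITION & SPEC =====
def Spec_buildboards (boardsinput : List String) (out : List (List (List String))) : Prop := out = buildboards_alt boardsinput
instance (boardsinput : List String) (out : List (List (List String))) : Decidable (Spec_buildboards boardsinput out) := by unfold Spec_buildboards; infer_instance

-- ===== CLAIM (what is proved, stated in full; the proofs are below) =====
def Claim_equal_buildboards : Prop := ∀ (boardsinput : List String), Dom_buildboards boardsinput → Spec_buildboards boardsinput (buildboards boardsinput)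

-- ===== LEMMAS AND PROOFS =====

theorem pvSegments_nil : pvSegments [] = [[]] := by
  rw [pvSegments.eq_def]; rfl

theorem pvSegments_ne_nil (lines : List String) : pvSegments lines ≠ [] := by
  rw [pvSegments.eq_def]
  split <;> simp

theorem pvSegments_of_none (lines : List String)
    (h : PySem.List.index? lines "" = none) : pvSegments lines = [lines] := by
  conv_lhs => unfold pvSegments
  split
  · rfl
  · rename_i p h'; rw [h] at h'; exact absurd h' (by simp)

theorem pvSegments_of_some (lines : List String) (p : Nat)
    (h : PySem.List.index? lines "" = some p) :
    pvSegments lines =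
      PySem.List.slice lines none (some (p : Int)) ::
        pvSegments (PySem.List.slice lines (some ((p : Int) + 1)) none) := by
  conv_lhs => unfold pvSegments
  split
  · rename_i h'; rw [h] at h'; exact absurd h' (by simp)
  · rename_i q h'; rw [h] at h'; injection h' with hq; subst hq; rfl

theorem pvSegments_blank (xs : List String) :
    pvSegments ("" :: xs) = [] :: pvSegments xs := by
  rw [pvSegments_of_some ("" :: xs) 0 (by rw [PySem.List.index?_cons_self])]
  rw [show ((0 : Nat) : Int) + 1 = (1 : Int) by norm_num, PySem.List.slice_from_one,
      PySem.List.slice_to_natCast (b := 0)]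
  simp

theorem pvSegments_cons (x : String) (xs : List String) (hx : x ≠ "") :
    pvSegments (x :: xs) =
      (x :: (pvSegments xs).headI) :: (pvSegments xs).tail := by
  have hstep := PySem.List.index?_cons_of_ne xs (v := "") hx
  cases h : PySem.List.index? xs "" with
  | none =>
    have h1 : PySem.List.index? (x :: xs) "" = none := by rw [hstep, h]; rfl
    rw [pvSegments_of_none _ h1, pvSegments_of_none _ h]
    simp
  | some p =>
    have h1 : PySem.List.index? (x :: xs) "" = some (p + 1) := by rw [hstep, h]; rfl
    rw [pvSegments_of_some _ _ h1, pvSegments_of_some _ _ h]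
    rw [show ((p + 1 : Nat) : Int) + 1 = ((p + 2 : Nat) : Int) by push_cast; ring]
    rw [show ((p : Nat) : Int) + 1 = ((p + 1 : Nat) : Int) by push_cast; ring]
    rw [PySem.List.slice_to_natCast (b := p + 1), PySem.List.slice_to_natCast (b := p),
        PySem.List.slice_from_natCast (a := p + 2), PySem.List.slice_from_natCast (a := p + 1)]
    simp [List.take_succ_cons, List.drop_succ_cons]

def pvStep (acc : List (List (List String)) × List (List String)) (i : String) :
    List (List (List String)) × List (List String) :=
  if i = "" then (acc.1 ++ [acc.2], [])
  else (acc.1, acc.2 ++ [pvProcLine i])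

theorem pvFold_inv (lines : List String) (bs : List (List (List String)))
    (b : List (List String)) :
    (lines.foldl pvStep (bs, b)).1 ++ [(lines.foldl pvStep (bs, b)).2]
      = bs ++ (b ++ ((pvSegments lines).headI).map pvProcLine)
          :: ((pvSegments lines).tail).map (List.map pvProcLine) := by
  induction lines generalizing bs b with
  | nil => simp [pvSegments_nil]
  | cons x xs ih =>
    by_cases hx : x = ""
    · subst hx
      rw [pvSegments_blank]
      simp only [List.foldl_cons, pvStep, reduceIte]
      rw [ih]
      have hne := pvSegments_ne_nil xs
      obtain ⟨h, t, hht⟩ : ∃ h t, pvSegments xs = h :: t :=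
        List.exists_cons_of_ne_nil hne
      simp [hht]
    · rw [pvSegments_cons x xs hx]
      simp only [List.foldl_cons, pvStep, if_neg hx]
      rw [ih]
      simp

-- ===== VERDICT (by name: the statement is the Claim_ definition above) =====
theorem buildboards_spec : Claim_equal_buildboards := by
  intro boardsinput _
  unfold Spec_buildboards buildboards buildboards_alt
  rw [PySem.List.slice_from_one]
  show ((boardsinput.foldl pvStep ([], [])).1 ++ [(boardsinput.foldl pvStep ([], [])).2]).tail = _
  rw [pvFold_inv boardsinput [] []]
  have hne := pvSegments_ne_nil boardsinput
  obtain ⟨h, t, hht⟩ : ∃ h t, pvSegments boardsinput = h :: t :=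
    List.exists_cons_of_ne_nil hne
  simp [hht]
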